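-- pv_equiv track=rewrite | github.com/pypi-data/pypi-mirror-369 | packages/fuglu/fuglu-1.6.0.tar.gz/fuglu-1.6.0/src/fuglu/plugins/uriextract.py | _check_skiplist
-- ===== SOURCE A (Python) =====
-- def _check_skiplist(skiplist, emailaddr):
--     emailaddr = emailaddr.lower()
--     maildomain = emailaddr.rsplit('@', 1)[-1]
--     for item in skiplist:
--         comp_mail = '@' in item
--         if comp_mail and item == emailaddr:
--             return True
--         elif not comp_mail and maildomain == item or maildomain.endswith(f'.{item}'):
--             return True
--     return False
-- ===== SOURCE B (Python) =====
-- def _check_skiplist(skiplist, emailaddr):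
--     entries = set(skiplist)
--     emailaddr = emailaddr.lower()
--     maildomain = emailaddr.rsplit('@', 1)[-1]
--     if '@' in emailaddr and emailaddr in entries:
--         return True
--     if maildomain in entries:
--         return True
--     for i in range(len(maildomain)):
--         if maildomain[i] == '.' and maildomain[i + 1:] in entries:
--             return True
--     return False
-- ===== Notes on version B (the rewrite author's own statement) =====
-- stated objective: alternative
-- what changed: Replaces A's per-entry scan with endswith tests by one set built from the skiplist and membership lookups of the lowered address, the maildomain, and each dot-position suffix of the maildomain.
import Mathlib
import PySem

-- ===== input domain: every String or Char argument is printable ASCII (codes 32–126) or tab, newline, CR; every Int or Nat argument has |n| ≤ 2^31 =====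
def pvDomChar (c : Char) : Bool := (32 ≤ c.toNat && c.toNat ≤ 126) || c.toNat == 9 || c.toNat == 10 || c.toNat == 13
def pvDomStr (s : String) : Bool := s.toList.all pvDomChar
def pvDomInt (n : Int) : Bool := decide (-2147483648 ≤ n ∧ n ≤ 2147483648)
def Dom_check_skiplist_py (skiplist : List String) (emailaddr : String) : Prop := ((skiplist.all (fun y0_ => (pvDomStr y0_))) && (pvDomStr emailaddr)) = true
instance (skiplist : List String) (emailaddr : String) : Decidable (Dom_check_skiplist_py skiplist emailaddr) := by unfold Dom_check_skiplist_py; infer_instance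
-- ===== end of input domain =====

-- B replaces A's per-entry endswith scan by set membership tests on the maildomain's dot-suffixes (objective: alternative).

-- s.rsplit('@', 1)[-1] : the part after the LAST '@', or the whole string if it has none (exact for a 1-char separator)
def pvRsplitLastAt (s : List Char) : List Char := (s.reverse.takeWhile (fun c => c ≠ '@')).reverse

-- ===== PORT A =====
-- the for-loop over skiplist: early return True on a match, else continue
def pvLoopA (e md : List Char) : List String → Bool
  | [] => false
  | item :: rest =>
    let it := item.toList
    let comp_mail := PySem.Chars.isIn ['@'] it
    if comp_mail && it == e then true
    else if (!comp_mail && md == it) || PySem.Chars.endswith md ('.' :: it) then true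
    else pvLoopA e md rest

def check_skiplist_py (skiplist : List String) (emailaddr : String) : Bool :=
  let e := PySem.Chars.lower emailaddr.toList
  let md := pvRsplitLastAt e
  pvLoopA e md skiplist

-- ===== PORT B =====
def check_skiplist_py_alt (skiplist : List String) (emailaddr : String) : Bool :=
  let entries := PySem.Set.ofList skiplist
  let e := PySem.Chars.lower emailaddr.toList
  let md := pvRsplitLastAt e
  if PySem.Chars.isIn ['@'] e && PySem.Set.contains entries (String.ofList e) then true
  else if PySem.Set.contains entries (String.ofList md) then true
  else (List.range md.length).any (fun i =>
    md.getD i ' ' == '.' && PySem.Set.contains entries (String.ofList (md.drop (i + 1))))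

-- ===== PRECONDITION & SPEC =====
def Spec_check_skiplist_py (skiplist : List String) (emailaddr : String) (out : Bool) : Prop := out = check_skiplist_py_alt skiplist emailaddr
instance (skiplist : List String) (emailaddr : String) (out : Bool) : Decidable (Spec_check_skiplist_py skiplist emailaddr out) := by unfold Spec_check_skiplist_py; infer_instance

-- ===== CLAIM (what is proved, stated in full; the proofs are below) =====
def Claim_equal_check_skiplist_py : Prop := ∀ (skiplist : List String) (emailaddr : String), Dom_check_skiplist_py skiplist emailaddr → Spec_check_skiplist_py skiplist emailaddr (check_skiplist_py skiplist emailaddr)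

-- ===== LEMMAS AND PROOFS =====

-- single-character containment is membership
lemma isIn_singleton (c : Char) (s : List Char) :
    PySem.Chars.isIn [c] s = true ↔ c ∈ s := by
  rw [PySem.Chars.isIn_iff_infix]
  constructor
  · rintro ⟨l, r, h⟩
    subst h; simp
  · intro h
    obtain ⟨l, r, h⟩ := List.append_of_mem h
    exact ⟨l, r, by simp [h]⟩

-- the maildomain never contains '@'
lemma at_not_mem_rsplit (s : List Char) : '@' ∉ pvRsplitLastAt s := by
  intro h
  unfold pvRsplitLastAt at h
  rw [List.mem_reverse] at h
  have := List.mem_takeWhile_imp h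
  simp at this

-- endswith md ('.'::it) ↔ some dot position i has it = md.drop (i+1)
lemma endswith_dot_iff (md it : List Char) :
    PySem.Chars.endswith md ('.' :: it) = true ↔
      ∃ i, i < md.length ∧ md.getD i ' ' = '.' ∧ md.drop (i + 1) = it := by
  rw [PySem.Chars.endswith_iff]
  constructor
  · rintro ⟨t, ht⟩
    refine ⟨t.length, ?_, ?_, ?_⟩
    · rw [← ht]; simp
    · have : md.drop t.length = '.' :: it := by rw [← ht]; simp
      have h0 : (md.drop t.length).getD 0 ' ' = '.' := by rw [this]; rfl
      simpa [List.getD_eq_getElem?_getD, List.getElem?_drop] using h0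
    · have : md.drop t.length = '.' :: it := by rw [← ht]; simp
      have := congrArg (List.drop 1) this
      simpa [List.drop_drop, Nat.add_comm] using this
  · rintro ⟨i, hi, hdot, hdrop⟩
    refine ⟨md.take i, ?_⟩
    have hd : md.drop i = '.' :: it := by
      have : md.drop i = md.getD i ' ' :: md.drop (i + 1) := by
        rw [List.getD_eq_getElem?_getD, List.getElem?_eq_getElem hi]
        exact List.drop_eq_getElem_cons hi
      rw [this, hdot, hdrop]
    calc md.take i ++ '.' :: it = md.take i ++ md.drop i := by rw [hd]
      _ = md := List.take_append_drop i md

-- A's loop is List.any of the per-item predicate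
lemma pvLoopA_eq_any (e md : List Char) (l : List String) :
    pvLoopA e md l = l.any (fun item =>
      (PySem.Chars.isIn ['@'] item.toList && item.toList == e) ||
      ((!PySem.Chars.isIn ['@'] item.toList && md == item.toList) ||
        PySem.Chars.endswith md ('.' :: item.toList))) := by
  induction l with
  | nil => rfl
  | cons item rest ih =>
    simp only [pvLoopA, List.any_cons, ← ih]
    by_cases h1 : (PySem.Chars.isIn ['@'] item.toList && item.toList == e) = true <;>
      by_cases h2 : ((!PySem.Chars.isIn ['@'] item.toList && md == item.toList) ||
        PySem.Chars.endswith md ('.' :: item.toList)) = true <;>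
      simp [h1, h2]

-- membership in B's set of entries is list membership of the string
lemma contains_ofList_strings (skiplist : List String) (cs : List Char) :
    PySem.Set.contains (PySem.Set.ofList skiplist) (String.ofList cs) = true ↔
      ∃ item ∈ skiplist, item.toList = cs := by
  rw [PySem.Set.contains_iff, PySem.Set.mem_ofList]
  constructor
  · intro h; exact ⟨String.ofList cs, h, by simp⟩
  · rintro ⟨item, hmem, hit⟩
    have : item = String.ofList cs := by
      have := congrArg String.ofList hit
      simpa using this
    exact this ▸ hmem

theorem check_skiplist_py_eq (skiplist : List String) (emailaddr : String) :
    check_skiplist_py skiplist emailaddr = check_skiplist_py_alt skiplist emailaddr := by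
  unfold check_skiplist_py check_skiplist_py_alt
  set e := PySem.Chars.lower emailaddr.toList with he
  set md := pvRsplitLastAt e with hmd
  set S := PySem.Set.ofList skiplist with hS
  rw [pvLoopA_eq_any]
  have hBform : ∀ b1 b2 b3 : Bool,
      (if b1 = true then true else if b2 = true then true else b3) = (b1 || b2 || b3) := by
    decide
  rw [hBform]
  rw [Bool.eq_iff_iff]
  rw [List.any_eq_true]
  simp only [Bool.or_eq_true, Bool.and_eq_true, beq_iff_eq, List.any_eq_true, List.mem_range,
    Bool.not_eq_true']
  constructor
  · rintro ⟨item, hmem, ⟨hat, hit⟩ | ⟨_, hmdit⟩ | hend⟩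
    · refine Or.inl (Or.inl ⟨?_, ?_⟩)
      · rw [hit] at hat; exact hat
      · exact (contains_ofList_strings skiplist e).mpr ⟨item, hmem, hit⟩
    · exact Or.inl (Or.inr ((contains_ofList_strings skiplist md).mpr ⟨item, hmem, hmdit.symm⟩))
    · rw [endswith_dot_iff] at hend
      obtain ⟨i, hi, hdot, hdrop⟩ := hend
      exact Or.inr ⟨i, hi, hdot, (contains_ofList_strings skiplist _).mpr ⟨item, hmem, hdrop.symm⟩⟩
  · rintro ((⟨hat, hin⟩ | h2) | ⟨i, hi, hdot, hin⟩)
    · obtain ⟨item, hmem, hit⟩ := (contains_ofList_strings skiplist e).mp hin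
      exact ⟨item, hmem, Or.inl ⟨by rw [hit]; exact hat, hit⟩⟩
    · obtain ⟨item, hmem, hit⟩ := (contains_ofList_strings skiplist md).mp h2
      refine ⟨item, hmem, Or.inr (Or.inl ⟨?_, hit.symm⟩)⟩
      rw [← Bool.not_eq_true, isIn_singleton, hit]
      exact at_not_mem_rsplit e
    · obtain ⟨item, hmem, hit⟩ := (contains_ofList_strings skiplist _).mp hin
      refine ⟨item, hmem, Or.inr (Or.inr ?_)⟩
      rw [endswith_dot_iff]
      exact ⟨i, hi, hdot, hit.symm⟩

-- ===== VERDICT (by name: the statement is the Claim_ definition above) =====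
theorem check_skiplist_py_spec : Claim_equal_check_skiplist_py := by
  intro skiplist emailaddr _
  unfold Spec_check_skiplist_py
  exact check_skiplist_py_eq skiplist emailaddr
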